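-- pv_equiv track=rewrite | github.com/mibrahimfm/coding-problems | Python/LongestPalindromicSubstring/Sol1-BruteForce.py | getAllSubstring
-- ===== SOURCE A (Python) =====
-- def getAllSubstring(s):
--     subStrings = {}
--     for i in range(len(s)):
--         subStr = ""
--
--         # Second loop is generating sub-String
--         for j in range(i,len(s)):
--             subStr += s[j]
--             subStrings[subStr] = len(subStr)
--
--     sortedSubStirngs = [key for key, _ in sorted(subStrings.items(), key=lambda x : x[1], reverse=True)]
--     return sortedSubStirngs
-- ===== SOURCE B (Python) =====
-- def getAllSubstring(s):
--     n = len(s)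
--     seen = set()
--     buckets = [[] for _ in range(n + 1)]
--     for i in range(n):
--         sub = ""
--         for j in range(i, n):
--             sub += s[j]
--             if sub not in seen:
--                 seen.add(sub)
--                 buckets[len(sub)].append(sub)
--     result = []
--     for bucket in reversed(buckets[1:]):
--         result.extend(bucket)
--     return result
-- ===== Notes on version B (the rewrite author's own statement) =====
-- stated objective: alternative
-- what changed: Replaces the dict-plus-stable-comparison-sort with a seen-set for first-encounter dedup and length-indexed buckets concatenated longest-to-shortest, eliminating the sort entirely.
import Mathlib
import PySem

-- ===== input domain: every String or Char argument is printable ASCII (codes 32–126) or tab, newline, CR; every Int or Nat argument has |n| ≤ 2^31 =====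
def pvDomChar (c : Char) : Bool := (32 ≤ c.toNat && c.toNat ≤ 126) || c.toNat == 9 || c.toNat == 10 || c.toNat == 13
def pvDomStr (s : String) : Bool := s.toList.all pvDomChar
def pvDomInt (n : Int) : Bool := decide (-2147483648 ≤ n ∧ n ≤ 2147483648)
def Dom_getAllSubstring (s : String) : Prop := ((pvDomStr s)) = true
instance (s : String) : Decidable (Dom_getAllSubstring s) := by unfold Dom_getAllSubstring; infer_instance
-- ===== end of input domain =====

-- B replaces A's dict + stable comparison sort with a seen-set dedup and length-indexed
-- buckets concatenated longest-to-shortest (alternative decomposition, no sort).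


-- ===== PORT A =====
def getAllSubstring (s : String) : List String :=
  let cs := s.toList
  let subStrings : PySem.Dict (List Char) Int :=
    (PySem.List.pyRange 0 (cs.length : Int) 1).foldl
      (fun d i =>
        ((PySem.List.pyRange i (cs.length : Int) 1).foldl
          (fun (st : List Char × PySem.Dict (List Char) Int) j =>
            let subStr := st.1 ++ [PySem.List.pyGetD cs j ' ']
            (subStr, st.2.insert subStr (subStr.length : Int)))
          ([], d)).2)
      PySem.Dict.empty
  (PySem.List.sorted subStrings.items (fun x => x.2) true).map (fun kv => String.ofList kv.1)

-- ===== PORT B =====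
def getAllSubstring_alt (s : String) : List String :=
  let cs := s.toList
  let n := cs.length
  let st :=
    (PySem.List.pyRange 0 (n : Int) 1).foldl
      (fun (st : PySem.Set (List Char) × List (List (List Char))) i =>
        ((PySem.List.pyRange i (n : Int) 1).foldl
          (fun (q : List Char × PySem.Set (List Char) × List (List (List Char))) j =>
            let sub := q.1 ++ [PySem.List.pyGetD cs j ' ']
            (sub, if q.2.1.contains sub then q.2
                  else (q.2.1 ++ [sub], q.2.2.modify sub.length (fun b => b ++ [sub]))))
          ([], st)).2)
      ([], List.replicate (n + 1) [])
  ((st.2.drop 1).reverse.foldl (fun acc b => acc ++ b) []).map (fun w => String.ofList w)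

-- ===== PRECONDITION & SPEC =====
def Spec_getAllSubstring (s : String) (out : List String) : Prop := out = getAllSubstring_alt s
instance (s : String) (out : List String) : Decidable (Spec_getAllSubstring s out) := by unfold Spec_getAllSubstring; infer_instance

-- ===== CLAIM (what is proved, stated in full; the proofs are below) =====
def Claim_equal_getAllSubstring : Prop := ∀ (s : String), Dom_getAllSubstring s → Spec_getAllSubstring s (getAllSubstring s)

-- ===== LEMMAS AND PROOFS =====

-- the sequence of substrings generated from start index i with current prefix cur
def pvGenFrom (cs : List Char) (i : Nat) (cur : List Char) : List (List Char) :=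
  if h : i < cs.length then (cur ++ [cs[i]]) :: pvGenFrom cs (i + 1) (cur ++ [cs[i]]) else []
termination_by cs.length - i

-- all substrings in generation order (i ascending, then length ascending)
def pvGen (cs : List Char) : List (List Char) :=
  (List.range cs.length).flatMap (fun i => pvGenFrom cs i [])

-- the inner for-j loop of either port is a fold of `act` over pvGenFrom
lemma pv_inner {σ : Type} (cs : List Char) (act : σ → List Char → σ) :
    ∀ (i : Nat) cur (st : σ),
      ((PySem.List.pyRange ((i : Nat) : Int) (cs.length : Int) 1).foldl
        (fun (q : List Char × σ) j =>
          (q.1 ++ [PySem.List.pyGetD cs j ' '],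
           act q.2 (q.1 ++ [PySem.List.pyGetD cs j ' ']))) (cur, st)).2
      = (pvGenFrom cs i cur).foldl act st := by
  intro i cur st
  fun_induction pvGenFrom cs i cur generalizing st with
  | case1 i cur h ih =>
      rw [PySem.List.pyRange_one_cons (by exact_mod_cast h)]
      rw [List.foldl_cons]
      have hc : ((i : Int) + 1) = ((i + 1 : Nat) : Int) := by push_cast; ring
      rw [hc]
      simp only [PySem.List.pyGetD_natCast, List.getD_eq_getElem _ _ h]
      exact ih (act st (cur ++ [cs[i]]))
  | case2 i cur h =>
      have : PySem.List.pyRange (i : Int) (cs.length : Int) 1 = [] := by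
        simp [PySem.List.pyRange]
        omega
      rw [this]
      rfl

lemma pv_foldl_flatMap {α σ : Type} (g : α → List (List Char)) (act : σ → List Char → σ) :
    ∀ (l : List α) (init : σ),
      l.foldl (fun st a => (g a).foldl act st) init = (l.flatMap g).foldl act init := by
  intro l
  induction l with
  | nil => intro init; simp
  | cons a t ih => intro init; simp [List.foldl_append, ih]

lemma pv_genFrom_len (cs : List Char) :
    ∀ i cur w, w ∈ pvGenFrom cs i cur → cur.length < w.length ∧ w.length ≤ cur.length + (cs.length - i) := by
  intro i cur
  fun_induction pvGenFrom cs i cur with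
  | case1 i cur h ih =>
      intro w hw
      rcases List.mem_cons.mp hw with hw | hw
      · subst hw; simp; omega
      · have := ih w hw
        simp at this ⊢
        omega
  | case2 i cur h =>
      intro w hw
      simp at hw

lemma pv_gen_len (cs : List Char) (w : List Char) (hw : w ∈ pvGen cs) :
    1 ≤ w.length ∧ w.length ≤ cs.length := by
  rcases List.mem_flatMap.mp hw with ⟨i, _, hmem⟩
  have := pv_genFrom_len cs i [] w hmem
  simp at this
  omega

-- one dict insertion with value = length of the key
lemma pv_insert_pair (m : List (List Char)) (w : List Char) :
    (PySem.Dict.mk (m.map (fun u => (u, (u.length : Int))))).insert w (w.length : Int)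
    = PySem.Dict.mk ((PySem.Set.add m w).map (fun u => (u, (u.length : Int)))) := by
  by_cases h : w ∈ m
  · have hc : ((m.map (fun u => (u, (u.length : Int)))).any (fun p => p.1 == w)) = true := by
      simp only [List.any_map, List.any_eq_true]
      exact ⟨w, h, by simp⟩
    have ha : PySem.Set.add m w = m := by
      simp [PySem.Set.add, PySem.Set.contains, h]
    rw [ha]
    simp only [PySem.Dict.insert, PySem.Dict.contains, hc, if_pos]
    congr 1
    rw [List.map_map]
    apply List.map_congr_left
    intro u hu
    by_cases he : u = w
    · subst he; simp
    · simp [Function.comp, he]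
  · have hc : ((m.map (fun u => (u, (u.length : Int)))).any (fun p => p.1 == w)) = false := by
      simp only [List.any_map, List.any_eq_false]
      intro u hu
      simp only [Function.comp]
      exact (Bool.not_eq_true _).mpr (beq_eq_false_iff_ne.mpr (fun (hew : u = w) => h (hew ▸ hu)))
    have ha : PySem.Set.add m w = m ++ [w] := by
      simp [PySem.Set.add, PySem.Set.contains, h]
    rw [ha]
    simp [PySem.Dict.insert, PySem.Dict.contains, hc]

-- A's dict accumulation: items are the distinct substrings paired with their lengths
lemma pv_dict_items (l : List (List Char)) :
    ∀ (m : List (List Char)),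
      (l.foldl (fun d w => d.insert w (w.length : Int))
        (PySem.Dict.mk (m.map (fun w => (w, (w.length : Int)))))).items
      = (PySem.Set.update m l).map (fun w => (w, (w.length : Int))) := by
  induction l with
  | nil => intro m; simp [PySem.Set.update]
  | cons w t ih =>
      intro m
      rw [List.foldl_cons, pv_insert_pair, ih (PySem.Set.add m w)]
      simp [PySem.Set.update]

-- appending a fresh substring to its length bucket keeps the buckets = filtered views of seen
lemma pv_bucket_step (n : Nat) (seen : List (List Char)) (w : List Char) :
    ((List.range (n + 1)).map (fun L => seen.filter (fun u => u.length == L))).modify w.length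
      (fun b => b ++ [w])
    = (List.range (n + 1)).map (fun L => (seen ++ [w]).filter (fun u => u.length == L)) := by
  apply List.ext_getElem
  · simp
  · intro j h1 h2
    rw [List.getElem_modify]
    simp only [List.getElem_map, List.getElem_range, List.filter_append]
    by_cases hj : w.length = j
    · subst hj; simp
    · simp [hj]

-- B's accumulation: seen is the distinct substrings, buckets are length-filtered views of seen
lemma pv_buckets (n : Nat) (l : List (List Char)) :
    ∀ (seen : List (List Char)),
      l.foldl (fun (p : PySem.Set (List Char) × List (List (List Char))) w =>
          if p.1.contains w then p
          else (p.1 ++ [w], p.2.modify w.length (fun b => b ++ [w])))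
        (seen, (List.range (n + 1)).map (fun L => seen.filter (fun w => w.length == L)))
      = (PySem.Set.update seen l,
         (List.range (n + 1)).map (fun L => (PySem.Set.update seen l).filter (fun w => w.length == L))) := by
  induction l with
  | nil => intro seen; simp [PySem.Set.update]
  | cons w t ih =>
      intro seen
      rw [List.foldl_cons]
      by_cases hc : w ∈ seen
      · have h1 : PySem.Set.contains seen w = true := by
          simpa [PySem.Set.contains] using hc
        have ha : PySem.Set.add seen w = seen := by simp [PySem.Set.add, PySem.Set.contains, hc]
        have hu : PySem.Set.update seen (w :: t) = PySem.Set.update seen t := by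
          simp [PySem.Set.update, ha]
        rw [hu]
        simpa [PySem.Set.contains, hc] using ih seen
      · have h1 : PySem.Set.contains seen w = false := by
          simpa [PySem.Set.contains] using hc
        have ha : PySem.Set.add seen w = seen ++ [w] := by simp [PySem.Set.add, PySem.Set.contains, hc]
        have hu : PySem.Set.update seen (w :: t) = PySem.Set.update (seen ++ [w]) t := by
          simp [PySem.Set.update, ha]
        rw [hu]
        have hstep := pv_bucket_step n seen w
        simpa [PySem.Set.contains, hc, hstep] using ih (seen ++ [w])

-- stable reverse sort: intercalating lemmas about insertBy
lemma pv_insertBy_append {α : Type} (before : α → α → Bool) (x : α) (ys zs : List α)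
    (h : ∀ y ∈ ys, before x y = false) :
    PySem.List.insertBy before x (ys ++ zs) = ys ++ PySem.List.insertBy before x zs := by
  induction ys with
  | nil => rfl
  | cons y t ih =>
      simp only [List.cons_append, PySem.List.insertBy]
      rw [h y (by simp)]
      exact congrArg (y :: ·) (ih (fun y hy => h y (by simp [hy])))

lemma pv_insertBy_front {α : Type} (before : α → α → Bool) (x : α) (zs : List α)
    (h : ∀ y ∈ zs, before x y = true) :
    PySem.List.insertBy before x zs = x :: zs := by
  cases zs with
  | nil => rfl
  | cons y t => simp [PySem.List.insertBy, h y (by simp)]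

-- stable reverse sort pulls out the maximal-key group first
lemma pv_pullTop {α : Type} (key : α → Int) (v : Int) :
    ∀ l : List α, (∀ x ∈ l, key x ≤ v) →
      PySem.List.sorted l key true
      = l.filter (fun x => decide (key x = v))
        ++ PySem.List.sorted (l.filter (fun x => decide (key x ≠ v))) key true := by
  intro l
  induction l using List.reverseRecOn with
  | nil => intro _; rfl
  | append_singleton l x ih =>
      intro h
      have hl : ∀ y ∈ l, key y ≤ v := fun y hy => h y (by simp [hy])
      have hx : key x ≤ v := h x (by simp)
      have hfold : PySem.List.sorted (l ++ [x]) key true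
          = PySem.List.insertBy (fun a b => decide (key b < key a)) x (PySem.List.sorted l key true) := by
        rw [PySem.List.sorted_rev_eq_foldl_insertBy, PySem.List.sorted_rev_eq_foldl_insertBy,
          List.foldl_append]
        rfl
      rw [hfold, ih hl]
      by_cases hxv : key x = v
      · rw [pv_insertBy_append _ x _ _ (by
          intro y hy
          have : key y = v := of_decide_eq_true (List.mem_filter.mp hy).2
          simp [this, hxv])]
        rw [pv_insertBy_front _ x _ (by
          intro y hy
          have hy' : y ∈ l.filter (fun t => decide (key t ≠ v)) := (PySem.List.mem_sorted _ _ _ _).mp hy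
          have hne : key y ≠ v := of_decide_eq_true (List.mem_filter.mp hy').2
          have hle : key y ≤ v := hl y (List.mem_filter.mp hy').1
          simp [hxv]
          exact lt_of_le_of_ne hle hne)]
        rw [List.filter_append, List.filter_append]
        simp [hxv]
      · have hxlt : key x < v := lt_of_le_of_ne hx hxv
        rw [pv_insertBy_append _ x _ _ (by
          intro y hy
          have : key y = v := of_decide_eq_true (List.mem_filter.mp hy).2
          simp [this]
          omega)]
        have h2 : PySem.List.insertBy (fun a b => decide (key b < key a)) x
              (PySem.List.sorted (l.filter (fun t => decide (key t ≠ v))) key true)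
            = PySem.List.sorted (l.filter (fun t => decide (key t ≠ v)) ++ [x]) key true := by
          rw [PySem.List.sorted_rev_eq_foldl_insertBy, PySem.List.sorted_rev_eq_foldl_insertBy,
            List.foldl_append]
          rfl
        rw [h2, List.filter_append, List.filter_append]
        simp [hxv]

-- stable reverse sort = concatenation of key-buckets along a strictly descending value list
lemma pv_bucketed {α : Type} (key : α → Int) :
    ∀ (vals : List Int), vals.Pairwise (fun a b => b < a) →
      ∀ l : List α, (∀ x ∈ l, key x ∈ vals) →
        PySem.List.sorted l key true
        = vals.flatMap (fun v => l.filter (fun x => decide (key x = v))) := by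
  intro vals
  induction vals with
  | nil =>
      intro _ l hl
      have : l = [] := by
        cases l with
        | nil => rfl
        | cons a t => exact absurd (hl a (by simp)) (by simp)
      subst this
      rfl
  | cons v vs ih =>
      intro hp l hl
      rw [List.pairwise_cons] at hp
      have hle : ∀ x ∈ l, key x ≤ v := by
        intro x hx
        rcases List.mem_cons.mp (hl x hx) with he | hm
        · exact le_of_eq he
        · exact le_of_lt (hp.1 _ hm)
      rw [pv_pullTop key v l hle]
      rw [ih hp.2 (l.filter (fun x => decide (key x ≠ v))) (by
        intro x hx
        have hne : key x ≠ v := of_decide_eq_true (List.mem_filter.mp hx).2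
        rcases List.mem_cons.mp (hl x (List.mem_filter.mp hx).1) with he | hm
        · exact absurd he hne
        · exact hm)]
      rw [List.flatMap_cons]
      congr 1
      rw [List.flatMap_def, List.flatMap_def]
      congr 1
      apply List.map_congr_left
      intro u hu
      rw [List.filter_filter]
      apply List.filter_congr
      intro x _
      by_cases he : key x = u
      · simp [he, (ne_of_lt (hp.1 u hu)) ]
      · simp [he]

-- port A reduced: stable reverse sort of the (distinct substring, length) pairs
lemma pv_A_eq (s : String) :
    getAllSubstring s
    = (PySem.List.sorted
        ((PySem.Set.ofList (pvGen s.toList)).map (fun w => (w, (w.length : Int))))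
        (fun x => x.2) true).map (fun kv => String.ofList kv.1) := by
  unfold getAllSubstring
  dsimp only
  rw [PySem.List.pyRange_zero_natCast, List.foldl_map]
  have hinner : ∀ (d : PySem.Dict (List Char) Int) (i : Nat), i ∈ List.range s.toList.length →
      (List.foldl (fun (st : List Char × PySem.Dict (List Char) Int) (j : Int) =>
          (st.1 ++ [PySem.List.pyGetD s.toList j ' '],
           st.2.insert (st.1 ++ [PySem.List.pyGetD s.toList j ' '])
             ((st.1 ++ [PySem.List.pyGetD s.toList j ' ']).length : Int)))
        ([], d) (PySem.List.pyRange (i : Int) (s.toList.length : Int) 1)).2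
      = (pvGenFrom s.toList i []).foldl (fun d w => d.insert w (w.length : Int)) d :=
    fun d i _ => pv_inner s.toList (fun d w => d.insert w (w.length : Int)) i [] d
  rw [PySem.List.foldl_congr_mem _ _ _ _ hinner]
  rw [pv_foldl_flatMap]
  rw [show (PySem.Dict.empty : PySem.Dict (List Char) Int)
      = PySem.Dict.mk (([] : List (List Char)).map (fun w => (w, (w.length : Int)))) from rfl]
  rw [pv_dict_items]
  rw [show PySem.Set.update ([] : PySem.Set (List Char))
        ((List.range s.toList.length).flatMap (fun x => pvGenFrom s.toList x []))
      = PySem.Set.ofList (pvGen s.toList) from by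
    simp [PySem.Set.update, PySem.Set.ofList_eq_foldl, pvGen]]

-- port B reduced: length buckets of the distinct substrings, longest first
lemma pv_B_eq (s : String) :
    getAllSubstring_alt s
    = ((List.range s.toList.length).reverse.map (fun k =>
        ((PySem.Set.ofList (pvGen s.toList)).filter (fun w => w.length == k + 1)).map
          (fun w => String.ofList w))).flatten := by
  unfold getAllSubstring_alt
  dsimp only
  rw [PySem.List.pyRange_zero_natCast, List.foldl_map]
  have hinner : ∀ (st : PySem.Set (List Char) × List (List (List Char))) (i : Nat),
      i ∈ List.range s.toList.length →
      (List.foldl (fun (q : List Char × PySem.Set (List Char) × List (List (List Char))) (j : Int) =>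
          (q.1 ++ [PySem.List.pyGetD s.toList j ' '],
           if (q.2.1).contains (q.1 ++ [PySem.List.pyGetD s.toList j ' ']) then q.2
           else (q.2.1 ++ [q.1 ++ [PySem.List.pyGetD s.toList j ' ']],
                 q.2.2.modify (q.1 ++ [PySem.List.pyGetD s.toList j ' ']).length
                   (fun b => b ++ [q.1 ++ [PySem.List.pyGetD s.toList j ' ']]))))
        ([], st) (PySem.List.pyRange (i : Int) (s.toList.length : Int) 1)).2
      = (pvGenFrom s.toList i []).foldl (fun p w =>
          if p.1.contains w then p
          else (p.1 ++ [w], p.2.modify w.length (fun b => b ++ [w]))) st :=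
    fun st i _ => pv_inner s.toList (fun p w =>
      if p.1.contains w then p
      else (p.1 ++ [w], p.2.modify w.length (fun b => b ++ [w]))) i [] st
  rw [PySem.List.foldl_congr_mem _ _ _ _ hinner]
  rw [pv_foldl_flatMap]
  rw [show List.replicate (s.toList.length + 1) ([] : List (List Char))
      = (List.range (s.toList.length + 1)).map
          (fun L => ([] : List (List Char)).filter (fun w => w.length == L)) from by
    simp [List.map_const']]
  rw [pv_buckets]
  rw [show PySem.Set.update ([] : PySem.Set (List Char))
        ((List.range s.toList.length).flatMap (fun x => pvGenFrom s.toList x []))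
      = PySem.Set.ofList (pvGen s.toList) from by
    simp [PySem.Set.update, PySem.Set.ofList_eq_foldl, pvGen]]
  rw [PySem.List.foldl_append_eq_flatten, List.nil_append]
  rw [← List.map_drop, List.range_succ_eq_map, List.drop_one, List.tail_cons]
  simp only [List.map_map, List.map_flatten, ← List.map_reverse]
  rfl

-- ===== VERDICT (by name: the statement is the Claim_ definition above) =====
theorem getAllSubstring_spec : Claim_equal_getAllSubstring := by
  intro s _
  show getAllSubstring s = getAllSubstring_alt s
  rw [pv_A_eq, pv_B_eq]
  rw [pv_bucketed (fun x : (List Char × Int) => x.2)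
      ((List.range s.toList.length).reverse.map (fun k => ((k + 1 : Nat) : Int)))
      (by
        rw [List.pairwise_map, List.pairwise_reverse]
        exact List.pairwise_lt_range.imp (by intro a b h; exact_mod_cast Nat.succ_lt_succ h))
      _
      (by
        intro x hx
        rcases List.mem_map.mp hx with ⟨w, hw, rfl⟩
        have hlen := pv_gen_len s.toList w ((PySem.Set.mem_ofList _ _).mp hw)
        simp only [List.mem_map, List.mem_reverse, List.mem_range]
        exact ⟨w.length - 1, by omega, by congr 1; omega⟩)]
  rw [List.map_flatMap, List.flatMap_map, List.flatMap_def]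
  congr 1
  apply List.map_congr_left
  intro k _
  rw [List.filter_map]
  rw [List.map_map]
  apply congrArg (List.map _)
  apply List.filter_congr
  intro w _
  show decide ((w.length : Int) = ((k + 1 : Nat) : Int)) = (w.length == k + 1)
  have h1 : ((w.length : Int) = ((k + 1 : Nat) : Int)) ↔ (w.length = k + 1) := by
    push_cast; omega
  rw [show (decide ((w.length : Int) = ((k + 1 : Nat) : Int))) = decide (w.length = k + 1) from
    decide_eq_decide.mpr h1]
  rcases eq_or_ne w.length (k + 1) with he | he
  · simp [he]
  · simp [he]
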